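-- pv_equiv track=rewrite | github.com/fuz3l/server-frameshift-mobile-application | python/converters/urls_converter.py | _convert_regex_pattern
-- ===== SOURCE A (Python) =====
-- def _convert_regex_pattern(pattern: str) -> str:
--     """Convert Django regex pattern to Flask route with converters"""
--
--     # Common conversions
--     conversions = {
--         r'\^': '',  # Remove start anchor
--         r'\$': '',  # Remove end anchor
--         r'(?P<pk>[0-9]+)': '<int:pk>',
--         r'(?P<id>[0-9]+)': '<int:id>',
--         r'(?P<slug>[-\w]+)': '<string:slug>',
--         r'(?P<username>[\w.@+-]+)': '<string:username>',
--     }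
--
--     flask_pattern = pattern
--     for django_regex, flask_conv in conversions.items():
--         flask_pattern = flask_pattern.replace(django_regex, flask_conv)
--
--     # Add slashes if needed
--     if not flask_pattern.startswith('/'):
--         flask_pattern = '/' + flask_pattern
--     if not flask_pattern.endswith('/'):
--         flask_pattern += '/'
--
--     return flask_pattern
-- ===== SOURCE B (Python) =====
-- _CONVERSIONS = [
--     ('\\^', ''),
--     ('\\$', ''),
--     ('(?P<pk>[0-9]+)', '<int:pk>'),
--     ('(?P<id>[0-9]+)', '<int:id>'),
--     ('(?P<slug>[-\\w]+)', '<string:slug>'),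
--     ('(?P<username>[\\w.@+-]+)', '<string:username>'),
-- ]
--
--
-- def _apply(s, subs):
--     """Apply each (pattern, repl) literal substitution via split/join."""
--     if not subs:
--         return s
--     django_regex, flask_conv = subs[0]
--     return _apply(flask_conv.join(s.split(django_regex)), subs[1:])
--
--
-- def _convert_regex_pattern(pattern: str) -> str:
--     """Convert Django regex pattern to Flask route with converters"""
--     p = _apply(pattern, _CONVERSIONS)
--     q = ('' if p.startswith('/') else '/') + p
--     return q + ('' if q.endswith('/') else '/')
-- ===== Notes on version B (the rewrite author's own statement) =====
-- stated objective: alternative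
-- what changed: Each str.replace pass becomes a split-on-key/join-with-replacement pass, the dict-driven for-loop becomes a recursive helper consuming the (key, replacement) list, and the two slash-guard statements become one arithmetic concatenation of conditional prefix/suffix pieces.
import Mathlib
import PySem

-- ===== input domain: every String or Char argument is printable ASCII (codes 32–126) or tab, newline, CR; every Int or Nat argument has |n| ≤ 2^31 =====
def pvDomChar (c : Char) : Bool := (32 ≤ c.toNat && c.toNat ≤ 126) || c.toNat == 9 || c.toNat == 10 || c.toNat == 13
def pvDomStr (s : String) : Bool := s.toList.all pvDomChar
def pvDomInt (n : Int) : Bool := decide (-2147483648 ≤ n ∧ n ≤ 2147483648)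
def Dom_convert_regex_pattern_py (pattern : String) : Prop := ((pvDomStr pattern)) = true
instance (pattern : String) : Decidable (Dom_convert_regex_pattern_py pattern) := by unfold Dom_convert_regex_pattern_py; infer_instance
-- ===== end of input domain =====

-- B replaces A's loop of str.replace passes with a recursive chain of split/join substitutions and an arithmetic slash-guard; objective: alternative (same cost, different mechanism).


-- ===== PORT A =====
def convert_regex_pattern_py (pattern : String) : String :=
  let conversions : PySem.Dict String String := PySem.Dict.ofList
    [("\\^", ""), ("\\$", ""),
     ("(?P<pk>[0-9]+)", "<int:pk>"), ("(?P<id>[0-9]+)", "<int:id>"),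
     ("(?P<slug>[-\\w]+)", "<string:slug>"), ("(?P<username>[\\w.@+-]+)", "<string:username>")]
  let flask1 := conversions.items.foldl (fun s kv => PySem.Str.replace s kv.1 kv.2) pattern
  let flask2 := if !(PySem.Str.startswith flask1 "/") then "/" ++ flask1 else flask1
  let flask3 := if !(PySem.Str.endswith flask2 "/") then flask2 ++ "/" else flask2
  flask3

-- ===== PORT B =====
def pvConversions : List (String × String) :=
  [("\\^", ""), ("\\$", ""),
   ("(?P<pk>[0-9]+)", "<int:pk>"), ("(?P<id>[0-9]+)", "<int:id>"),
   ("(?P<slug>[-\\w]+)", "<string:slug>"), ("(?P<username>[\\w.@+-]+)", "<string:username>")]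

-- Source B's `flask_conv.join(s.split(django_regex))` (split sep is a nonempty literal, so Python never raises)
def pvJoinSplit (s k v : String) : String :=
  String.ofList (PySem.Chars.join v.toList (PySem.Chars.splitOn s.toList k.toList))

def pvApply : String → List (String × String) → String
  | s, [] => s
  | s, kv :: rest => pvApply (pvJoinSplit s kv.1 kv.2) rest

def convert_regex_pattern_py_alt (pattern : String) : String :=
  let p := pvApply pattern pvConversions
  let q := (if PySem.Str.startswith p "/" then "" else "/") ++ p
  q ++ (if PySem.Str.endswith q "/" then "" else "/")

-- ===== PRECONDITION & SPEC =====
def Spec_convert_regex_pattern_py (pattern : String) (out : String) : Prop := out = convert_regex_pattern_py_alt pattern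
instance (pattern : String) (out : String) : Decidable (Spec_convert_regex_pattern_py pattern out) := by unfold Spec_convert_regex_pattern_py; infer_instance

-- ===== CLAIM (what is proved, stated in full; the proofs are below) =====
def Claim_equal_convert_regex_pattern_py : Prop := ∀ (pattern : String), Dom_convert_regex_pattern_py pattern → Spec_convert_regex_pattern_py pattern (convert_regex_pattern_py pattern)

-- ===== LEMMAS AND PROOFS =====

-- proof-side specification of a single left-to-right replacement pass
def pvRep (old new : List Char) : List Char → List Char
  | [] => []
  | c :: t =>
    if old.isPrefixOf (c :: t) then new ++ pvRep old new (t.drop (old.length - 1))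
    else c :: pvRep old new t
termination_by l => l.length
decreasing_by all_goals simp

-- proof-side specification of splitting on a separator
def pvSplit (old : List Char) : List Char → List (List Char)
  | [] => [[]]
  | c :: t =>
    if old.isPrefixOf (c :: t) then [] :: pvSplit old (t.drop (old.length - 1))
    else (pvSplit old t).modifyHead (c :: ·)
termination_by l => l.length
decreasing_by all_goals simp

lemma pv_drop_eq (old : List Char) (h : old ≠ []) (c : Char) (t : List Char) :
    (c :: t).drop old.length = t.drop (old.length - 1) := by
  cases old with
  | nil => simp at h
  | cons a b => simp

lemma pvSplit_ne_nil (sep l : List Char) : pvSplit sep l ≠ [] := by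
  induction l using pvSplit.induct sep with
  | case1 => simp [pvSplit]
  | case2 c t hp ih => rw [pvSplit, if_pos hp]; simp
  | case3 c t hp ih =>
    rw [pvSplit, if_neg hp]
    cases hs : pvSplit sep t with
    | nil => exact absurd hs ih
    | cons p ps => simp

lemma pv_goRep (old new : List Char) (h : old ≠ []) :
    ∀ fuel l acc, l.length ≤ fuel →
      PySem.Chars.replace.go old new fuel l acc = acc.reverse ++ pvRep old new l := by
  intro fuel
  induction fuel with
  | zero =>
    intro l acc hl
    have : l = [] := by cases l <;> simp_all
    subst this
    simp [PySem.Chars.replace.go, pvRep]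
  | succ n ih =>
    intro l acc hl
    cases l with
    | nil => simp [PySem.Chars.replace.go, pvRep]
    | cons c t =>
      have hl' : t.length ≤ n := by simp at hl; omega
      rw [PySem.Chars.replace.go]
      by_cases hp : old.isPrefixOf (c :: t)
      · rw [if_pos hp, pv_drop_eq old h,
          ih _ _ (by rw [List.length_drop]; omega), pvRep, if_pos hp]
        simp
      · rw [if_neg hp, ih _ _ hl', pvRep, if_neg hp]
        simp

lemma pv_goSplit (sep : List Char) (h : sep ≠ []) :
    ∀ fuel l cur acc, l.length ≤ fuel →
      PySem.Chars.splitOn.go sep fuel l cur acc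
        = acc.reverse ++ (pvSplit sep l).modifyHead (cur.reverse ++ ·) := by
  intro fuel
  induction fuel with
  | zero =>
    intro l cur acc hl
    have : l = [] := by cases l <;> simp_all
    subst this
    simp [PySem.Chars.splitOn.go, pvSplit]
  | succ n ih =>
    intro l cur acc hl
    cases l with
    | nil => simp [PySem.Chars.splitOn.go, pvSplit]
    | cons c t =>
      have hl' : t.length ≤ n := by simp at hl; omega
      rw [PySem.Chars.splitOn.go]
      by_cases hp : sep.isPrefixOf (c :: t)
      · rw [if_pos hp, pv_drop_eq sep h,
          ih _ _ _ (by rw [List.length_drop]; omega), pvSplit, if_pos hp]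
        cases pvSplit sep (List.drop (sep.length - 1) t) <;> simp
      · rw [if_neg hp, ih _ _ _ hl', pvSplit, if_neg hp]
        cases hs : pvSplit sep t with
        | nil => exact absurd hs (pvSplit_ne_nil _ _)
        | cons p ps => simp

lemma pv_join_modifyHead (new : List Char) (c : Char) (p : List Char) (ps : List (List Char)) :
    PySem.Chars.join new (List.modifyHead (c :: ·) (p :: ps)) = c :: PySem.Chars.join new (p :: ps) := by
  cases ps with
  | nil => simp [PySem.Chars.join_singleton]
  | cons q qs =>
    simp only [List.modifyHead]
    rw [PySem.Chars.join_cons_cons, PySem.Chars.join_cons_cons]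
    simp

lemma pv_join_pvSplit (old new : List Char) :
    ∀ l, PySem.Chars.join new (pvSplit old l) = pvRep old new l := by
  intro l
  induction l using pvSplit.induct old with
  | case1 => simp [pvSplit, pvRep, PySem.Chars.join_singleton]
  | case2 c t hp ih =>
    rw [pvSplit, if_pos hp, pvRep, if_pos hp]
    cases hs : pvSplit old (t.drop (old.length - 1)) with
    | nil => exact absurd hs (pvSplit_ne_nil _ _)
    | cons p ps =>
      rw [hs] at ih
      rw [PySem.Chars.join_cons_cons, ← ih]
      simp
  | case3 c t hp ih =>
    rw [pvSplit, if_neg hp, pvRep, if_neg hp]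
    cases hs : pvSplit old t with
    | nil => exact absurd hs (pvSplit_ne_nil _ _)
    | cons p ps =>
      rw [hs] at ih
      rw [pv_join_modifyHead, ih]

-- join(new, s.split(old)) = s.replace(old, new) for a nonempty separator
lemma pv_chars_key (s old new : List Char) (h : old ≠ []) :
    PySem.Chars.join new (PySem.Chars.splitOn s old) = PySem.Chars.replace s old new := by
  rw [PySem.Chars.replace, PySem.Chars.splitOn,
    if_neg (by simp [List.isEmpty_iff, h]),
    pv_goRep old new h s.length s [] le_rfl,
    pv_goSplit old h (s.length + 1) s [] [] (by omega)]
  cases hs : pvSplit old s with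
  | nil => exact absurd hs (pvSplit_ne_nil _ _)
  | cons p ps => simp [← pv_join_pvSplit old new s, hs]

lemma pvJoinSplit_eq_replace (s k v : String) (h : k.toList ≠ []) :
    pvJoinSplit s k v = PySem.Str.replace s k v := by
  apply String.toList_inj.mp
  rw [PySem.Str.toList_replace, pvJoinSplit]
  simp [pv_chars_key s.toList k.toList v.toList h]

lemma pvApply_eq_foldl (l : List (String × String)) (h : ∀ kv ∈ l, kv.1 ≠ "") :
    ∀ s, pvApply s l = l.foldl (fun s kv => PySem.Str.replace s kv.1 kv.2) s := by
  induction l with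
  | nil => intro s; simp [pvApply]
  | cons kv rest ih =>
    intro s
    have hk : kv.1.toList ≠ [] := by
      intro e
      exact h kv (by simp) (String.toList_inj.mp (by simp [e]))
    rw [pvApply, pvJoinSplit_eq_replace _ _ _ hk, ih (fun p hp => h p (by simp [hp])),
      List.foldl]

lemma pv_tail_eq (q : String) :
    (if !(PySem.Str.endswith q "/") then q ++ "/" else q)
      = q ++ (if PySem.Str.endswith q "/" then "" else "/") := by
  cases h : PySem.Chars.endswith q.toList ['/'] <;> simp [PySem.Str.endswith_eq, h]

lemma pv_guard_eq (r : String) :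
    (if !(PySem.Str.endswith (if !(PySem.Str.startswith r "/") then "/" ++ r else r) "/")
       then (if !(PySem.Str.startswith r "/") then "/" ++ r else r) ++ "/"
       else (if !(PySem.Str.startswith r "/") then "/" ++ r else r))
      = ((if PySem.Str.startswith r "/" then "" else "/") ++ r)
          ++ (if PySem.Str.endswith ((if PySem.Str.startswith r "/" then "" else "/") ++ r) "/"
              then "" else "/") := by
  by_cases h1 : PySem.Str.startswith r "/"
  · have hq : ("" : String) ++ r = r := by simp
    simp only [h1, Bool.not_true, Bool.false_eq_true, if_false, if_true, hq]
    exact pv_tail_eq r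
  · simp only [h1, Bool.not_false, Bool.false_eq_true, if_false, if_true]
    exact pv_tail_eq ("/" ++ r)

-- ===== VERDICT (by name: the statement is the Claim_ definition above) =====
theorem convert_regex_pattern_py_spec : Claim_equal_convert_regex_pattern_py := by
  intro pattern _
  unfold Spec_convert_regex_pattern_py convert_regex_pattern_py convert_regex_pattern_py_alt
  dsimp only
  have hitems : (PySem.Dict.ofList
      [("\\^", ""), ("\\$", ""),
       ("(?P<pk>[0-9]+)", "<int:pk>"), ("(?P<id>[0-9]+)", "<int:id>"),
       ("(?P<slug>[-\\w]+)", "<string:slug>"), ("(?P<username>[\\w.@+-]+)", "<string:username>")]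
      : PySem.Dict String String).items = pvConversions := by
    decide
  rw [hitems, pvApply_eq_foldl pvConversions (by decide) pattern]
  exact pv_guard_eq _
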